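-- pv_equiv track=rewrite | github.com/LikhithHG/LeetCode | Arrays/Stack/2282. Number of People That Can Be Seen in a Grid.py | seePeople
-- ===== SOURCE A (Python) =====
-- from typing import List
--
-- def seePeople(heights: List[List[int]]) -> List[List[int]]:
--     m, n = len(heights), len(heights[0])
--     result = [[0]*n for _ in range(m)]
--
--     for i in range(m):
--         stack = []
--
--         for j in range(n-1,-1,-1):
--             equal = False
--
--             while stack and heights[i][j] >= stack[-1]:
--
--                 if heights[i][j] == stack[-1]:
--                     equal = True
--
--                 stack.pop()
--                 result[i][j] += 1
--
--             if stack and not equal: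
--                 result[i][j] += 1
--
--             stack.append(heights[i][j])
--
--     for j in range(n):
--         stack = []
--
--         for i in range(m-1,-1,-1):
--             equal = False
--
--             while stack and heights[i][j] >= stack[-1]:
--
--                 if heights[i][j] == stack[-1]:
--                     equal = True
--
--                 stack.pop()
--                 result[i][j] += 1
--
--             if stack and not equal:
--                 result[i][j] += 1
--
--             stack.append(heights[i][j])
--
--     return result
-- ===== SOURCE B (Python) =====
-- from typing import List
--
-- def seePeople(heights: List[List[int]]) -> List[List[int]]:
--     # Direct per-cell scan: walk right (then down), counting each person taller
--     # than the running max; the first person of height >= the viewer is counted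
--     # and blocks the view.
--     m, n = len(heights), len(heights[0])
--
--     def visible(v, seq):
--         c = 0
--         best = None
--         for h in seq:
--             if best is None or h > best:
--                 c += 1
--                 best = h
--             if h >= v:
--                 break
--         return c
--
--     res = []
--     for i in range(m):
--         row = []
--         for j in range(n):
--             v = heights[i][j]
--             c = visible(v, heights[i][j + 1:n])
--             c += visible(v, [heights[k][j] for k in range(i + 1, m)])
--             row.append(c)
--         res.append(row)
--     return res
-- ===== Notes on version B (the rewrite author's own statement) =====
-- stated objective: simpler
-- what changed: Replaces A's two monotonic-stack passes with mutable result updates by a direct per-cell scan to the right and downward that counts people taller than the running maximum and stops at the first blocker of height >= the viewer.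
import Mathlib
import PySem

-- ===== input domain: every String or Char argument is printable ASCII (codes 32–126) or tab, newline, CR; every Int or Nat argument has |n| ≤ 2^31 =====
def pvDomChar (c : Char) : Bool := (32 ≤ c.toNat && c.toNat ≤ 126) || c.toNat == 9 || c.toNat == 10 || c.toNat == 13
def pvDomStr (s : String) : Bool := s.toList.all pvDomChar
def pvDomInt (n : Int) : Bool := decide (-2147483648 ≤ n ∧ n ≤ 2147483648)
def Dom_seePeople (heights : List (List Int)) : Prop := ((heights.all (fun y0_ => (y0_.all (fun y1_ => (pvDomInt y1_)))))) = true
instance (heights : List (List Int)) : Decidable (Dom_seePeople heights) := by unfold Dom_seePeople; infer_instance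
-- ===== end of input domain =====

-- B replaces A's two monotonic-stack passes by a direct per-cell scan (simpler; not faster).
-- A raises IndexError on [] and on rows shorter than the first row; those inputs are outside Pre_.


-- ===== PORT A =====
-- the inner `while stack and heights[i][j] >= stack[-1]` loop of A: returns
-- (number of pops, whether some popped element equalled v, remaining stack).
-- The stack's top is the list head.
def popA (v : Int) : List Int → Int × Bool × List Int
  | [] => (0, false, [])
  | h :: t =>
    if v ≥ h then
      let (c, e, st) := popA v t
      (c + 1, e || decide (v = h), st)
    else (0, false, h :: t)

-- one pass of A's scan (j from n-1 down to 0 = structural recursion from the right):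
-- returns (per-position counts, final stack).  Count = pops + (1 if the stack is
-- non-empty afterwards and no equal element was popped), exactly A's loop body.
def rowGo : List Int → List Int × List Int
  | [] => ([], [])
  | v :: rest =>
    let (cs, st) := rowGo rest
    let (c, e, st') := popA v st
    ((c + (if st' ≠ [] ∧ e = false then 1 else 0)) :: cs, v :: st')

def rowCounts (l : List Int) : List Int := (rowGo l).1

-- A writes result[i][j] = row-pass contribution, then the column pass ADDS the
-- column contribution with the identical stack loop; the port computes both
-- contributions with the same stack scan (rows read up to n = len(heights[0])
-- entries, exactly as A's j-range does) and sums them per cell.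
def seePeople (heights : List (List Int)) : List (List Int) :=
  let m := heights.length
  let n := (heights.headD []).length
  let rows := heights.map (fun r => rowCounts (r.take n))
  let cols := (List.range n).map (fun j => rowCounts (heights.map (fun r => r.getD j 0)))
  (List.range m).map (fun i => (List.range n).map (fun j =>
    (rows.getD i []).getD j 0 + (cols.getD j []).getD i 0))

-- ===== PORT B =====
-- Source B's `visible(v, seq)`: scan seq keeping the running maximum `best` (None at
-- first); a person taller than best is counted (and becomes best); stop at the
-- first person of height >= v.  The loop body is transcribed per `best` case.
def visible (v : Int) : Option Int → List Int → Int
  | none, [] => 0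
  | some _, [] => 0
  | none, h :: t => if v ≤ h then 1 else 1 + visible v (some h) t
  | some b, h :: t =>
    if b < h then (if v ≤ h then 1 else 1 + visible v (some h) t)
    else (if v ≤ h then 0 else visible v (some b) t)

-- heights[i][j+1:n] = (take n).drop (j+1); the downward column is a map over the
-- remaining rows, as Source B's list comprehension over range(i+1, m).
def seePeople_alt (heights : List (List Int)) : List (List Int) :=
  let m := heights.length
  let n := (heights.headD []).length
  (List.range m).map (fun i => (List.range n).map (fun j =>
    let v := (heights.getD i []).getD j 0
    visible v none (((heights.getD i []).take n).drop (j + 1)) +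
    visible v none ((heights.drop (i + 1)).map (fun r => r.getD j 0))))

-- ===== PRECONDITION & SPEC =====
-- Pre_ = exactly where Python A returns: a non-empty grid whose every row has at
-- least len(heights[0]) entries (otherwise heights[0] or heights[i][j] raises IndexError).
def Pre_seePeople (heights : List (List Int)) : Prop :=
  heights ≠ [] ∧ ∀ r ∈ heights, (heights.headD []).length ≤ r.length
instance (heights : List (List Int)) : Decidable (Pre_seePeople heights) := by
  unfold Pre_seePeople; infer_instance

def pvWitness_seePeople : List (List Int) := [[3, 1, 4], [2, 2, 1]]

def Spec_seePeople (heights : List (List Int)) (out : List (List Int)) : Prop := out = seePeople_alt heights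
instance (heights : List (List Int)) (out : List (List Int)) : Decidable (Spec_seePeople heights out) := by unfold Spec_seePeople; infer_instance

-- ===== CLAIM (what is proved, stated in full; the proofs are below) =====
def Claim_equal_seePeople : Prop := ∀ (heights : List (List Int)), Dom_seePeople heights → Pre_seePeople heights → Spec_seePeople heights (seePeople heights)

-- ===== LEMMAS AND PROOFS =====

-- the stack after A has processed the suffix l
def stk (l : List Int) : List Int := (rowGo l).2

-- the count A's loop body produces for value v against stack st
def stepA (v : Int) (st : List Int) : Int :=
  let (c, e, st') := popA v st
  c + (if st' ≠ [] ∧ e = false then 1 else 0)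

theorem rowGo_cons (v : Int) (t : List Int) :
    rowGo (v :: t) = (stepA v (stk t) :: rowCounts t, v :: (popA v (stk t)).2.2) := by
  simp [rowGo, rowCounts, stk, stepA]

theorem popA_rest_sorted (v : Int) (st : List Int) (hs : List.Pairwise (· < ·) st) :
    (popA v st).2.2 = st.filter (fun x => decide (v < x)) := by
  induction st with
  | nil => simp [popA]
  | cons h t ih =>
    rcases List.pairwise_cons.mp hs with ⟨hall, hst⟩
    by_cases hv : v ≥ h
    · simp only [popA, if_pos hv]
      have hnv : ¬ (v < h) := by omega
      simp [ih hst, List.filter_cons, hnv]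
    · have hlt : v < h := by omega
      simp only [popA, if_neg hv]
      have hkeep : ∀ x ∈ t, (decide (v < x)) = true := fun x hx => by
        have := hall x hx; simp; omega
      simp [List.filter_cons, hlt, List.filter_eq_self.mpr hkeep]

theorem stk_cons (v : Int) (t : List Int) (hs : List.Pairwise (· < ·) (stk t)) :
    stk (v :: t) = v :: (stk t).filter (fun x => decide (v < x)) := by
  show (rowGo (v :: t)).2 = _
  rw [rowGo_cons]
  rw [popA_rest_sorted v (stk t) hs]

theorem stk_sorted (l : List Int) : List.Pairwise (· < ·) (stk l) := by
  induction l with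
  | nil => exact List.Pairwise.nil
  | cons v t ih =>
    rw [stk_cons v t ih]
    refine List.pairwise_cons.mpr ⟨?_, ih.filter _⟩
    intro b hb
    have := List.of_mem_filter hb
    simpa using this

-- popping stops immediately on a stack whose every element exceeds v
theorem popA_stop (v : Int) (X : List Int) (hall : ∀ x ∈ X, v < x) :
    popA v X = (0, false, X) := by
  cases X with
  | nil => rfl
  | cons y ys =>
    have hny : ¬ (v ≥ y) := by have := hall y (List.mem_cons_self ..); omega
    simp [popA, hny]

-- A's count when the top blocks (v ≤ top, everything below larger): exactly 1
theorem stepA_break (v h : Int) (X : List Int) (hall : ∀ x ∈ X, h < x) (hvh : v ≤ h) :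
    stepA v (h :: X) = 1 := by
  by_cases heq : v = h
  · subst heq
    have hstop := popA_stop v X (fun x hx => hall x hx)
    simp [stepA, popA, hstop]
  · have hnv : ¬ (v ≥ h) := by omega
    simp [stepA, popA, hnv]

-- a strictly smaller top is popped (counted, no equality) and popping continues
theorem stepA_pop (v h : Int) (X : List Int) (hlt : h < v) :
    stepA v (h :: X) = 1 + stepA v X := by
  have hv : v ≥ h := by omega
  have hne : ¬ (v = h) := by omega
  simp only [stepA, popA, if_pos hv, hne]
  rcases hpa : popA v X with ⟨c, e, st'⟩
  simp
  ring

-- the `keep` predicate of B's running maximum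
def keep (best : Option Int) (x : Int) : Bool :=
  match best with | none => true | some b => decide (b < x)

theorem keep_none_eq (X : List Int) : X.filter (keep none) = X :=
  List.filter_eq_self.mpr (fun _ _ => rfl)

theorem keep_some_eq (b : Int) : keep (some b) = fun x => decide (b < x) := rfl

-- filtering by (b < ·) absorbs a previous filter by (h < ·) when h ≤ b
theorem filter_absorb (h b : Int) (hle : h ≤ b) (S : List Int) :
    (S.filter (fun x => decide (h < x))).filter (fun x => decide (b < x))
      = S.filter (fun x => decide (b < x)) := by
  induction S with
  | nil => rfl
  | cons y ys ih =>
    by_cases hby : b < y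
    · have hy : h < y := by omega
      simp [List.filter_cons, hy, hby, ih]
    · by_cases hy : h < y
      · simp [List.filter_cons, hy, hby, ih]
      · simp [List.filter_cons, hy, hby, ih]

theorem map_drop_comm {α β : Type} (f : α → β) (n : Nat) (l : List α) :
    (l.drop n).map f = (l.map f).drop n := by
  induction l generalizing n with
  | nil => simp
  | cons h t ih =>
    cases n with
    | zero => simp
    | succ k => simpa using ih k

-- MAIN: B's per-cell scan with running max `best` equals A's step count on the
-- `best`-filtered stack of the scanned suffix.
theorem visible_eq_stepA (t : List Int) (v : Int) (best : Option Int)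
    (hbv : ∀ b, best = some b → b < v) :
    visible v best t = stepA v ((stk t).filter (keep best)) := by
  induction t generalizing best with
  | nil =>
    cases best <;> simp [visible, stk, rowGo, stepA, popA]
  | cons h t' ih =>
    rw [stk_cons h t' (stk_sorted t'), List.filter_cons]
    have hmemS : ∀ x ∈ (stk t').filter (fun x => decide (h < x)), h < x := by
      intro x hx
      have := List.of_mem_filter hx
      simpa using this
    cases best with
    | none =>
      rw [if_pos (show keep none h = true from rfl)]
      rw [keep_none_eq]
      by_cases hbr : v ≤ h
      · rw [stepA_break v h _ hmemS hbr]
        simp [visible, hbr]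
      · have hlt : h < v := by omega
        rw [stepA_pop v h _ hlt]
        have hih := ih (some h) (fun b hb => by cases hb; omega)
        rw [keep_some_eq] at hih
        simp [visible, hbr, hih]
    | some b =>
      have hbvb : b < v := hbv b rfl
      by_cases hk : b < h
      · rw [if_pos (show keep (some b) h = true by simp [keep]; omega)]
        have habs : ((stk t').filter (fun x => decide (h < x))).filter (keep (some b))
            = (stk t').filter (fun x => decide (h < x)) :=
          List.filter_eq_self.mpr (fun x hx => by
            have := hmemS x hx; simp [keep]; omega)
        rw [habs]
        by_cases hbr : v ≤ h
        · rw [stepA_break v h _ hmemS hbr]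
          simp [visible, hk, hbr]
        · have hlt : h < v := by omega
          rw [stepA_pop v h _ hlt]
          have hih := ih (some h) (fun b' hb' => by cases hb'; omega)
          rw [keep_some_eq] at hih
          simp [visible, hk, hbr, hih]
      · rw [if_neg (show ¬ keep (some b) h = true by simp [keep]; omega)]
        have hle : h ≤ b := by omega
        have hbr : ¬ (v ≤ h) := by omega
        rw [keep_some_eq, filter_absorb h b hle]
        have hih := ih (some b) (fun b' hb' => by cases hb'; omega)
        rw [keep_some_eq] at hih
        simp [visible, hk, hbr, hih]

theorem visible_eq_stepA_none (t : List Int) (v : Int) :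
    visible v none t = stepA v (stk t) := by
  rw [visible_eq_stepA t v none (fun b hb => by cases hb)]
  rw [keep_none_eq]

-- the j-th entry A's pass writes = B's scan of the suffix after j
theorem rowCounts_getD (l : List Int) (j : Nat) (hj : j < l.length) :
    (rowCounts l).getD j 0 = visible (l.getD j 0) none (l.drop (j + 1)) := by
  induction l generalizing j with
  | nil => simp at hj
  | cons v t ih =>
    have hc : rowCounts (v :: t) = stepA v (stk t) :: rowCounts t := by
      simp [rowCounts, rowGo_cons]
    rw [hc]
    cases j with
    | zero => simpa using (visible_eq_stepA_none t v).symm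
    | succ j' => simpa using ih j' (by simpa using hj)

theorem getD_map_range {α : Type} (f : Nat → α) (n j : Nat) (hj : j < n) (d : α) :
    (((List.range n).map f).getD j d) = f j := by
  rw [List.getD_eq_getElem?_getD, List.getElem?_map, List.getElem?_range hj]
  rfl

theorem getD_map {α β : Type} (f : α → β) (l : List α) (i : Nat) (hi : i < l.length)
    (d : α) (d' : β) : ((l.map f).getD i d') = f (l.getD i d) := by
  rw [List.getD_eq_getElem?_getD, List.getElem?_map,
    List.getElem?_eq_getElem (by simpa using hi), List.getD_eq_getElem?_getD,
    List.getElem?_eq_getElem hi]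
  rfl

-- ===== VERDICT (by name: the statement is the Claim_ definition above) =====
theorem seePeople_spec : Claim_equal_seePeople := by
  intro heights _ hpre
  obtain ⟨hne, hrows⟩ := hpre
  unfold Spec_seePeople seePeople seePeople_alt
  simp only []
  apply List.map_congr_left
  intro i hi
  have him : i < heights.length := List.mem_range.mp hi
  apply List.map_congr_left
  intro j hj
  have hjn : j < (heights.headD []).length := List.mem_range.mp hj
  set n := (heights.headD []).length with hn
  set r := heights.getD i [] with hr
  have hrmem : r ∈ heights := by
    rw [hr, List.getD_eq_getElem?_getD, List.getElem?_eq_getElem him]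
    exact List.getElem_mem him
  have hrlen : n ≤ r.length := hrows r hrmem
  have hjr : j < r.length := lt_of_lt_of_le hjn hrlen
  have htlen : (r.take n).length = n := by simp; omega
  have hrowA : ((heights.map (fun r => rowCounts (r.take n))).getD i []).getD j 0
      = visible ((r.take n).getD j 0) none ((r.take n).drop (j + 1)) := by
    rw [getD_map (fun r => rowCounts (r.take n)) heights i him [] []]
    exact rowCounts_getD (r.take n) j (by omega)
  have hvtake : (r.take n).getD j 0 = r.getD j 0 := by
    rw [List.getD_eq_getElem?_getD, List.getD_eq_getElem?_getD,
      List.getElem?_take_of_lt hjn]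
  have hcolA : (((List.range n).map
        (fun j => rowCounts (heights.map (fun r => r.getD j 0)))).getD j []).getD i 0
      = visible ((heights.map (fun r => r.getD j 0)).getD i 0) none
          ((heights.map (fun r => r.getD j 0)).drop (i + 1)) := by
    rw [getD_map_range _ n j hjn]
    exact rowCounts_getD _ i (by simpa using him)
  have hcolv : (heights.map (fun r => r.getD j 0)).getD i 0 = r.getD j 0 := by
    rw [getD_map (fun r => r.getD j 0) heights i him []]
  rw [hrowA, hcolA, hvtake, hcolv, map_drop_comm]

theorem pvWitness_ok : Dom_seePeople pvWitness_seePeople ∧ Pre_seePeople pvWitness_seePeople := by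
  constructor <;> decide
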